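-- pv_equiv track=rewrite | github.com/lauriruri/prpagit1 | practica.py | minimum_pos
-- ===== SOURCE A (Python) =====
-- def minimum_pos(l):
--     aux = l[0]
--     pos = 0
--     contador = 0
--     longitud = len(l)
--     for i in range(0,len(l)):
--         if (aux == -1 and contador < longitud-1):
--             aux = l[i+1]
--             pos = i+1
--         if (l[i] == -1):
--             contador = contador + 1
--         if (l[i]<aux and l[i]!=-1):
--             aux = l[i]
--             pos = i
--     return (aux, pos, contador)
-- ===== SOURCE B (Python) =====
-- def minimum_pos(l):
--     contador = l.count(-1)
--     valid = [x for x in l if x != -1]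
--     if valid:
--         best = min(valid)
--         pos = l.index(best)
--     else:
--         best, pos = -1, len(l) - 1
--     return (best, pos, contador)
-- ===== Notes on version B (the rewrite author's own statement) =====
-- stated objective: simpler
-- what changed: Replaced A's single loop with a self-shifting look-ahead sentinel (aux = l[i+1]) by a plain decomposition: count the -1s with l.count, filter them out, take min of the rest and its first index with l.index; (-1, len(l)-1, n) when everything is -1.
import Mathlib
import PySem

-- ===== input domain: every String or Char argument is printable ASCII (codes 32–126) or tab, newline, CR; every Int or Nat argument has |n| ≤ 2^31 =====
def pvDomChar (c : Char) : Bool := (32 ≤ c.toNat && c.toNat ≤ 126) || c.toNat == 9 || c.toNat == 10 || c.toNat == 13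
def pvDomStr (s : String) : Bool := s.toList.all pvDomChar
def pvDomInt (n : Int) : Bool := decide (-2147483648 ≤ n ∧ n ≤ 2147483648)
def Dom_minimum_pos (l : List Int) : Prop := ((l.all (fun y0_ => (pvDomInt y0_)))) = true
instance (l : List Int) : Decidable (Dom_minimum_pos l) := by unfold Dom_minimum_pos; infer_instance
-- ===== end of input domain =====

-- B replaces A's self-shifting look-ahead loop by count/filter/min/index; simpler decomposition, same O(n).
-- ===== PORT A =====
-- A's loop body, one iteration of 'for i in range(0, len(l))' over the state (aux, pos, contador)
def minimum_pos_step (l : List Int) (st : Int × Int × Int) (i : Int) : Int × Int × Int :=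
  let aux := st.1
  let pos := st.2.1
  let contador := st.2.2
  let shift := aux = -1 ∧ contador < PySem.List.len l - 1
  let aux2 := if shift then PySem.List.pyGetD l (i + 1) 0 else aux
  let pos2 := if shift then i + 1 else pos
  let contador2 := if PySem.List.pyGetD l i 0 = -1 then contador + 1 else contador
  if PySem.List.pyGetD l i 0 < aux2 ∧ PySem.List.pyGetD l i 0 ≠ -1 then
    (PySem.List.pyGetD l i 0, i, contador2)
  else
    (aux2, pos2, contador2)

-- the initial first-element read raises IndexError on the empty list: excluded by Pre_; pyGetD is exact on every admitted input
def minimum_pos (l : List Int) : Int × Int × Int :=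
  (PySem.List.pyRange 0 (PySem.List.len l) 1).foldl (minimum_pos_step l)
    (PySem.List.pyGetD l 0 0, 0, 0)

-- ===== PORT B =====
def minimum_pos_alt (l : List Int) : Int × Int × Int :=
  let contador : Int := PySem.List.count l (-1)
  let valid := l.filter (fun x => x ≠ -1)
  match PySem.List.min? valid (fun x => x) with
  | some best => (best, ((PySem.List.index? l best).getD 0 : Nat), contador)
  | none => (-1, PySem.List.len l - 1, contador)

-- ===== PRECONDITION & SPEC =====
-- Pre_ excludes only the empty list, on which A raises IndexError reading the first element.
def Pre_minimum_pos (l : List Int) : Prop := l ≠ []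
instance (l : List Int) : Decidable (Pre_minimum_pos l) := by unfold Pre_minimum_pos; infer_instance
def pvWitness_minimum_pos : List Int := [3, -1, 2]

def Spec_minimum_pos (l : List Int) (out : Int × Int × Int) : Prop := out = minimum_pos_alt l
instance (l : List Int) (out : Int × Int × Int) : Decidable (Spec_minimum_pos l out) := by unfold Spec_minimum_pos; infer_instance

-- ===== CLAIM (what is proved, stated in full; the proofs are below) =====
def Claim_equal_minimum_pos : Prop := ∀ (l : List Int), Dom_minimum_pos l → Pre_minimum_pos l → Spec_minimum_pos l (minimum_pos l)

-- ===== LEMMAS AND PROOFS =====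

-- min of a one-longer list (Python's min over the filtered prefix, extended by one element)
lemma min?_id_append_singleton (q : List Int) (y : Int) :
    PySem.List.min? (q ++ [y]) (fun x => x) =
      some (match PySem.List.min? q (fun x => x) with
            | none => y
            | some m => min m y) := by
  cases q with
  | nil => simp [PySem.List.min?]
  | cons a t =>
    rw [List.cons_append, PySem.List.min?_id_cons, PySem.List.min?_id_cons]
    simp [List.foldl_append]

-- the invariant of A's loop: after k iterations the state is determined by the prefix l.take k
lemma minimum_pos_inv (l : List Int) (hl : l ≠ []) (k : Nat) (hk : k ≤ l.length) :
    (PySem.List.pyRange 0 (k : Int) 1).foldl (minimum_pos_step l)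
      (PySem.List.pyGetD l 0 0, 0, 0) =
      match PySem.List.min? ((l.take k).filter (fun x => x ≠ -1)) (fun x => x) with
      | some m => (m, (((PySem.List.index? (l.take k) m).getD 0 : Nat) : Int),
                   (((l.take k).count (-1) : Nat) : Int))
      | none =>
          if k < l.length then (PySem.List.pyGetD l (k : Int) 0, (k : Int), (k : Int))
          else (-1, (l.length : Int) - 1, (l.length : Int)) := by
  induction k with
  | zero =>
    have h0 : 0 < l.length := List.length_pos_iff.mpr hl
    simp [PySem.List.pyRange_one_eq_nil, h0, PySem.List.min?]
  | succ k ih =>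
    have hk' : k < l.length := by omega
    have ihk := ih (le_of_lt hk')
    have hsplit : PySem.List.pyRange 0 ((k : Int) + 1) 1 =
        PySem.List.pyRange 0 (k : Int) 1 ++ [(k : Int)] :=
      PySem.List.pyRange_one_succ_right (by exact_mod_cast Nat.zero_le k)
    have htake : l.take (k + 1) = l.take k ++ [l[k]] := by
      rw [List.take_add_one]; simp [List.getElem?_eq_getElem hk']
    have hget : PySem.List.pyGetD l (k : Int) 0 = l[k] := by
      simp [PySem.List.pyGetD_natCast, List.getD_eq_getElem?_getD, List.getElem?_eq_getElem hk']
    have hpush : ((k : Int) + 1) = ((k + 1 : Nat) : Int) := by push_cast; ring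
    rw [hpush] at hsplit
    rw [hsplit, List.foldl_append, ihk]
    cases hmin : PySem.List.min? ((l.take k).filter (fun x => x ≠ -1)) (fun x => x) with
    | none =>
      -- the whole prefix l.take k is -1
      have hall : ∀ x ∈ l.take k, x = -1 := by
        have hnil := (PySem.List.min?_eq_none_iff _ _).mp hmin
        intro x hx
        by_contra hne
        have hmemf : x ∈ (l.take k).filter (fun x => x ≠ -1) :=
          List.mem_filter.mpr ⟨hx, by simpa using hne⟩
        rw [hnil] at hmemf
        simp at hmemf
      have hcnt : (l.take k).count (-1) = k := by
        have hlen : (l.take k).length = k := List.length_take_of_le (le_of_lt hk')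
        have := List.count_eq_length.mpr (fun b hb => (hall b hb).symm)
        omega
      simp only [hk', if_true]
      by_cases hy : l[k] = -1
      · -- current element is -1 too
        have hfil : (l.take (k + 1)).filter (fun x => x ≠ -1) = [] := by
          rw [htake, List.filter_append]
          have h1 : (l.take k).filter (fun x => x ≠ -1) = [] :=
            (PySem.List.min?_eq_none_iff _ _).mp hmin
          rw [h1]
          simp [hy]
        rw [List.foldl_cons, List.foldl_nil]
        by_cases hlast : k + 1 < l.length
        · -- shift: aux = l[k+1], pos = k+1, contador = k+1
          have hshift : ((k : Int) < (l.length : Int) - 1) := by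
            have : (k : Int) + 1 < (l.length : Int) := by exact_mod_cast hlast
            omega
          simp only [minimum_pos_step, PySem.List.len_eq, hget, hy, hfil,
            PySem.List.min?, hshift]
          norm_num [hshift, hlast]
        · -- k = length - 1: no shift; final all-(-1) state
          have hkeq : k + 1 = l.length := by omega
          have hnoshift : ¬ ((k : Int) < (l.length : Int) - 1) := by
            have : ((k : Int)) + 1 = (l.length : Int) := by exact_mod_cast hkeq
            omega
          simp only [minimum_pos_step, PySem.List.len_eq, hget, hy, hfil,
            PySem.List.min?]
          norm_num [hnoshift, hlast]
          omega
      · -- current element is the first non-(-1): min = l[k], pos = k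
        have hnotmem : l[k] ∉ l.take k := fun hmem => hy (hall _ hmem)
        have hfil : (l.take (k + 1)).filter (fun x => x ≠ -1) = [l[k]] := by
          rw [htake, List.filter_append]
          have h1 : (l.take k).filter (fun x => x ≠ -1) = [] :=
            (PySem.List.min?_eq_none_iff _ _).mp hmin
          rw [h1]
          simp [hy]
        have hidx : PySem.List.index? (l.take (k + 1)) l[k] = some (l.take k).length := by
          rw [htake]; exact PySem.List.index?_append_singleton_self _ _ hnotmem
        have hlen : (l.take k).length = k := List.length_take_of_le (le_of_lt hk')
        have hcnt2 : (l.take (k + 1)).count (-1) = k := by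
          rw [htake, List.count_append]
          simp [hy, hcnt]
        rw [List.foldl_cons, List.foldl_nil]
        rw [PySem.List.index?_eq_idxOf?] at hidx
        simp only [minimum_pos_step, PySem.List.len_eq, hget, hy, hfil,
          PySem.List.min?, hcnt2]
        norm_num [hy, hidx, hlen]
    | some m =>
      -- prefix has a valid minimum m (≠ -1, member of the prefix)
      have hmmem' : m ∈ (l.take k).filter (fun x => x ≠ -1) := PySem.List.min?_mem hmin
      have hmmem : m ∈ l.take k := (List.mem_filter.mp hmmem').1
      have hmne : m ≠ -1 := by
        have := (List.mem_filter.mp hmmem').2; simpa using this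
      have hmin' : ∀ y ∈ (l.take k).filter (fun x => x ≠ -1), m ≤ y := by
        intro y hy; exact PySem.List.min?_isMin hmin y hy
      have hfil : (l.take (k + 1)).filter (fun x => x ≠ -1) =
          (l.take k).filter (fun x => x ≠ -1) ++ (if l[k] = -1 then [] else [l[k]]) := by
        rw [htake, List.filter_append]
        by_cases hy : l[k] = -1 <;> simp [hy]
      rw [List.foldl_cons, List.foldl_nil]
      by_cases hy : l[k] = -1
      · -- -1: only contador moves
        have hm2 : PySem.List.min? ((l.take (k + 1)).filter (fun x => x ≠ -1)) (fun x => x)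
            = some m := by rw [hfil, if_pos hy, List.append_nil]; exact hmin
        have hidx : PySem.List.index? (l.take (k + 1)) m =
            PySem.List.index? (l.take k) m := by
          rw [htake]; exact PySem.List.index?_append_of_mem _ hmmem
        have hcnt : (l.take (k + 1)).count (-1) = (l.take k).count (-1) + 1 := by
          rw [htake, List.count_append]; simp [hy]
        simp only [minimum_pos_step, PySem.List.len_eq, hget, hy, hm2, hidx, hcnt]
        norm_num [hmne]
      · by_cases hlt : l[k] < m
        · -- strictly smaller: new minimum at position k
          have hnotmem : l[k] ∉ l.take k := by
            intro hmem
            have : l[k] ∈ (l.take k).filter (fun x => x ≠ -1) := by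
              simp [List.mem_filter, hmem, hy]
            exact absurd (hmin' _ this) (by omega)
          have hm2 : PySem.List.min? ((l.take (k + 1)).filter (fun x => x ≠ -1)) (fun x => x)
              = some l[k] := by
            rw [hfil, if_neg hy, min?_id_append_singleton, hmin]
            simp [min_eq_right (le_of_lt hlt)]
          have hidx : PySem.List.index? (l.take (k + 1)) l[k] = some (l.take k).length := by
            rw [htake]; exact PySem.List.index?_append_singleton_self _ _ hnotmem
          have hlen : (l.take k).length = k := List.length_take_of_le (le_of_lt hk')
          have hcnt : (l.take (k + 1)).count (-1) = (l.take k).count (-1) := by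
            rw [htake, List.count_append]; simp [hy]
          simp only [minimum_pos_step, PySem.List.len_eq, hget, hm2, hidx, hcnt, hlen]
          norm_num [hmne, hy, hlt]
        · -- not smaller: state unchanged
          have hm2 : PySem.List.min? ((l.take (k + 1)).filter (fun x => x ≠ -1)) (fun x => x)
              = some m := by
            rw [hfil, if_neg hy, min?_id_append_singleton, hmin]
            simp [min_eq_left (by omega : m ≤ l[k])]
          have hidx : PySem.List.index? (l.take (k + 1)) m =
              PySem.List.index? (l.take k) m := by
            rw [htake]; exact PySem.List.index?_append_of_mem _ hmmem
          have hcnt : (l.take (k + 1)).count (-1) = (l.take k).count (-1) := by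
            rw [htake, List.count_append]; simp [hy]
          simp only [minimum_pos_step, PySem.List.len_eq, hget, hm2, hidx, hcnt]
          norm_num [hmne, hy, hlt]

-- ===== VERDICT (by name: the statement is the Claim_ definition above) =====
theorem minimum_pos_spec : Claim_equal_minimum_pos := by
  intro l _hdom hl
  unfold Spec_minimum_pos minimum_pos minimum_pos_alt
  have hinv := minimum_pos_inv l hl l.length (le_refl _)
  rw [PySem.List.len_eq] at *
  rw [hinv]
  rw [List.take_length]
  cases hmin : PySem.List.min? (l.filter (fun x => x ≠ -1)) (fun x => x) with
  | none =>
    -- everything is -1: count l (-1) = length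
    have hmin' : (PySem.List.min? (List.filter (fun x => !decide (x = -1)) l) fun x => x) = none := by
      simpa using hmin
    have hnil := (PySem.List.min?_eq_none_iff _ _).mp hmin
    have hall : ∀ x ∈ l, x = -1 := by
      intro x hx; by_contra hne
      have hmemf : x ∈ l.filter (fun x => x ≠ -1) :=
        List.mem_filter.mpr ⟨hx, by simpa using hne⟩
      rw [hnil] at hmemf
      simp at hmemf
    have hcnt : List.count (-1) l = l.length :=
      List.count_eq_length.mpr (fun b hb => (hall b hb).symm)
    simp [hmin', PySem.List.count, hcnt]
  | some m =>
    have hmin' : (PySem.List.min? (List.filter (fun x => !decide (x = -1)) l) fun x => x) = some m := by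
      simpa using hmin
    simp [hmin', PySem.List.count, PySem.List.index?_eq_idxOf?]
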